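-- pv_equiv track=rewrite | github.com/mksong76/icx | icx/icon/prep.py | search_prep
-- ===== SOURCE A (Python) =====
-- def search_prep(prep_info:dict, key: str) -> any:
--     preps = []
--     for addr, prep in prep_info.items():
--         if addr == key:
--             return prep
--         elif key in addr:
--             preps.append(prep)
--         elif prep.get('address', '') == key:
--             return prep
--         elif key in prep.get('address', ''):
--             preps.append(prep)
--         elif key in prep.get('p2p', ''):
--             preps.append(prep)
--         elif key.lower() in prep.get('name', '').lower():
--             preps.append(prep)
--     if len(preps) > 0:
--         return preps[0]
--     return None
-- ===== SOURCE B (Python) =====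
-- def _rank(addr, prep, key):
--     """Match quality of one entry: 0 = exact, 1 = partial, None = no match."""
--     if addr == key:
--         return 0
--     if key in addr:
--         return 1
--     if prep.get('address', '') == key:
--         return 0
--     if key in prep.get('address', ''):
--         return 1
--     if key in prep.get('p2p', ''):
--         return 1
--     if key.lower() in prep.get('name', '').lower():
--         return 1
--     return None
--
-- def search_prep(prep_info: dict, key: str) -> any:
--     matches = [(r, prep) for addr, prep in prep_info.items()
--                if (r := _rank(addr, prep, key)) is not None]
--     return min(matches, key=lambda m: m[0])[1] if matches else None
-- ===== Notes on version B (the rewrite author's own statement) =====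
-- stated objective: alternative
-- what changed: Replaces A's single early-returning loop with a 'preps' accumulator by a rank-and-select decomposition: one comprehension ranks every matching entry (0 = exact, 1 = partial) and the result is the minimum-ranked match (Python's min is stable, so the first best match wins).
import Mathlib
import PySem

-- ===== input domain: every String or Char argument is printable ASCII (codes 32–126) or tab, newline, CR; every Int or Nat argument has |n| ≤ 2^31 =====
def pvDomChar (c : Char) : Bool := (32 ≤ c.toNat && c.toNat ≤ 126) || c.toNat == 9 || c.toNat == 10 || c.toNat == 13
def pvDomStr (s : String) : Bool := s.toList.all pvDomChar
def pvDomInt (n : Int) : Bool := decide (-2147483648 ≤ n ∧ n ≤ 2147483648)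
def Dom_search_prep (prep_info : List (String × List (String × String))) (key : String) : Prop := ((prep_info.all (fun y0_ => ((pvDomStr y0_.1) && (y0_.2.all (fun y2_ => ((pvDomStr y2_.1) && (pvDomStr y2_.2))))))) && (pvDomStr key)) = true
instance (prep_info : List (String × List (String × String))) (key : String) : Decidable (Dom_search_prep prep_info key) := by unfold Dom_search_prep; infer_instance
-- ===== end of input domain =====

-- B ranks every matching entry by quality (0 = exact, 1 = partial) in one comprehension and
-- returns the minimum-ranked match, instead of A's early-returning loop with a partials
-- accumulator; objective: alternative (same cost, a different decomposition).

-- shared primitive wrapper: prep.get(f, '')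
def pvGetS (prep : List (String × String)) (f : String) : String :=
  PySem.Dict.getD (PySem.Dict.mk prep) f ""

-- ===== PORT A =====
def searchALoop (key : String) :
    List (String × List (String × String)) → List (List (String × String)) →
    Option (List (String × String))
  | [], preps =>
    match preps with
    | p :: _ => some p
    | [] => none
  | (addr, prep) :: rest, preps =>
    if addr == key then some prep
    else if PySem.Str.isIn key addr then searchALoop key rest (preps ++ [prep])
    else if pvGetS prep "address" == key then some prep
    else if PySem.Str.isIn key (pvGetS prep "address") then searchALoop key rest (preps ++ [prep])
    else if PySem.Str.isIn key (pvGetS prep "p2p") then searchALoop key rest (preps ++ [prep])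
    else if PySem.Str.isIn (PySem.Str.lower key) (PySem.Str.lower (pvGetS prep "name")) then
      searchALoop key rest (preps ++ [prep])
    else searchALoop key rest preps

def search_prep (prep_info : List (String × List (String × String))) (key : String) :
    Option (List (String × String)) :=
  searchALoop key prep_info []

-- ===== PORT B =====
-- _rank: match quality of one entry (some 0 = exact, some 1 = partial, none = no match)
def pvRank (addr : String) (prep : List (String × String)) (key : String) : Option Nat :=
  if addr == key then some 0
  else if PySem.Str.isIn key addr then some 1
  else if pvGetS prep "address" == key then some 0
  else if PySem.Str.isIn key (pvGetS prep "address") then some 1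
  else if PySem.Str.isIn key (pvGetS prep "p2p") then some 1
  else if PySem.Str.isIn (PySem.Str.lower key) (PySem.Str.lower (pvGetS prep "name")) then some 1
  else none

def search_prep_alt (prep_info : List (String × List (String × String))) (key : String) :
    Option (List (String × String)) :=
  let ms := prep_info.filterMap
    (fun ap => (pvRank ap.1 ap.2 key).map (fun r => (r, ap.2)))
  match PySem.List.min? ms (fun m => m.1) with
  | some m => some m.2
  | none => none

-- ===== PRECONDITION & SPEC =====
def Spec_search_prep (prep_info : List (String × List (String × String))) (key : String) (out : Option (List (String × String))) : Prop := out = search_prep_alt prep_info key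
instance (prep_info : List (String × List (String × String))) (key : String) (out : Option (List (String × String))) : Decidable (Spec_search_prep prep_info key out) := by unfold Spec_search_prep; infer_instance

-- ===== CLAIM (what is proved, stated in full; the proofs are below) =====
def Claim_equal_search_prep : Prop := ∀ (prep_info : List (String × List (String × String))) (key : String), Dom_search_prep prep_info key → Spec_search_prep prep_info key (search_prep prep_info key)

-- ===== LEMMAS AND PROOFS =====

-- the ranked match list B builds
def pvM (key : String) (l : List (String × List (String × String))) :
    List (Nat × List (String × String)) :=
  l.filterMap (fun ap => (pvRank ap.1 ap.2 key).map (fun r => (r, ap.2)))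

lemma pvM_rank_mem (key : String) (l : List (String × List (String × String))) :
    ∀ x ∈ pvM key l, x.1 = 0 ∨ x.1 = 1 := by
  intro x hx
  simp only [pvM, List.mem_filterMap, Option.map_eq_some_iff] at hx
  obtain ⟨ap, _, r, hr, rfl⟩ := hx
  simp only [pvRank] at hr
  split_ifs at hr <;> simp_all

-- the value A's loop produces, phrased over B's ranked match list and A's accumulator
def pvOut {P : Type} (M : List (Nat × P)) (preps : List P) : Option P :=
  match M.find? (fun x => x.1 == 0) with
  | some x => some x.2
  | none =>
    match preps with
    | p :: _ => some p
    | [] => (M.head?).map (fun x => x.2)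

-- one partial-match step: appending prep to A's accumulator vs. consing (1, prep) onto B's match list
lemma pvStep1 {P : Type} (M' : List (Nat × P)) (prep : P) (preps : List P) :
    pvOut M' (preps ++ [prep]) = pvOut (((1 : Nat), prep) :: M') preps := by
  unfold pvOut
  simp only [List.find?_cons, show (((1 : Nat), prep).1 == 0) = false from rfl]
  cases hf : M'.find? (fun x => x.1 == 0) <;> cases preps <;> simp [hf]

lemma searchALoop_eq_pvM (key : String) (l : List (String × List (String × String))) :
    ∀ preps, searchALoop key l preps = pvOut (pvM key l) preps := by
  induction l with
  | nil => intro preps; cases preps <;> simp [searchALoop, pvM, pvOut]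
  | cons hd rest ih =>
    intro preps
    obtain ⟨addr, prep⟩ := hd
    by_cases h1 : addr = key
    · have hM : pvM key ((addr, prep) :: rest) = (0, prep) :: pvM key rest := by
        simp [pvM, pvRank, List.filterMap_cons, h1]
      rw [hM]; simp [searchALoop, h1, pvOut, List.find?_cons]
    · by_cases h2 : PySem.Chars.isIn key.toList addr.toList = true
      · have hM : pvM key ((addr, prep) :: rest) = (1, prep) :: pvM key rest := by
          simp [pvM, pvRank, List.filterMap_cons, h1, h2]
        rw [hM, show searchALoop key ((addr, prep) :: rest) preps =
            searchALoop key rest (preps ++ [prep]) by simp [searchALoop, h1, h2], ih]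
        exact pvStep1 (pvM key rest) prep preps
      · by_cases h3 : pvGetS prep "address" = key
        · have hM : pvM key ((addr, prep) :: rest) = (0, prep) :: pvM key rest := by
            simp [pvM, pvRank, List.filterMap_cons, h1, h2, h3]
          rw [hM]; simp [searchALoop, h1, h2, h3, pvOut, List.find?_cons]
        · by_cases h4 : PySem.Chars.isIn key.toList (pvGetS prep "address").toList = true
          · have hM : pvM key ((addr, prep) :: rest) = (1, prep) :: pvM key rest := by
              simp [pvM, pvRank, List.filterMap_cons, h1, h2, h3, h4]
            rw [hM, show searchALoop key ((addr, prep) :: rest) preps =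
                searchALoop key rest (preps ++ [prep]) by simp [searchALoop, h1, h2, h3, h4], ih]
            exact pvStep1 (pvM key rest) prep preps
          · by_cases h5 : PySem.Chars.isIn key.toList (pvGetS prep "p2p").toList = true
            · have hM : pvM key ((addr, prep) :: rest) = (1, prep) :: pvM key rest := by
                simp [pvM, pvRank, List.filterMap_cons, h1, h2, h3, h4, h5]
              rw [hM, show searchALoop key ((addr, prep) :: rest) preps =
                  searchALoop key rest (preps ++ [prep]) by
                    simp [searchALoop, h1, h2, h3, h4, h5], ih]
              exact pvStep1 (pvM key rest) prep preps
            · by_cases h6 : PySem.Chars.isIn (PySem.Chars.lower key.toList)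
                  (PySem.Chars.lower (pvGetS prep "name").toList) = true
              · have hM : pvM key ((addr, prep) :: rest) = (1, prep) :: pvM key rest := by
                  simp [pvM, pvRank, List.filterMap_cons, h1, h2, h3, h4, h5, h6]
                rw [hM, show searchALoop key ((addr, prep) :: rest) preps =
                    searchALoop key rest (preps ++ [prep]) by
                      simp [searchALoop, h1, h2, h3, h4, h5, h6], ih]
                exact pvStep1 (pvM key rest) prep preps
              · have hM : pvM key ((addr, prep) :: rest) = pvM key rest := by
                  simp [pvM, pvRank, List.filterMap_cons, h1, h2, h3, h4, h5, h6]
                rw [hM, show searchALoop key ((addr, prep) :: rest) preps =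
                    searchALoop key rest preps by
                      simp [searchALoop, h1, h2, h3, h4, h5, h6], ih]

lemma min?_fold_zero_one {P : Type} (t : List (Nat × P))
    (hm : ∀ x ∈ t, x.1 = 0 ∨ x.1 = 1) (a : Nat × P) (ha : a.1 = 0 ∨ a.1 = 1) :
    List.foldl
      (fun acc x =>
        match acc with
        | none => some x
        | some mm => if x.1 < mm.1 then some x else some mm)
      (some a) t =
      some (if a.1 = 0 then a else ((t.find? (fun x => x.1 == 0)).getD a)) := by
  induction t generalizing a with
  | nil => simp
  | cons x t iht =>
    have hx := hm x (by simp)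
    have hmt : ∀ y ∈ t, y.1 = 0 ∨ y.1 = 1 := fun y hy => hm y (by simp [hy])
    simp only [List.foldl_cons]
    rcases ha with ha | ha
    · have hlt : ¬ x.1 < a.1 := by omega
      rw [if_neg hlt, iht hmt a (Or.inl ha), if_pos ha, if_pos ha]
    · rcases hx with hx | hx
      · have hlt : x.1 < a.1 := by omega
        rw [if_pos hlt, iht hmt x (Or.inl hx), if_pos hx, if_neg (by omega : ¬ a.1 = 0)]
        simp [List.find?_cons, hx]
      · have hlt : ¬ x.1 < a.1 := by omega
        rw [if_neg hlt, iht hmt a (Or.inr ha), if_neg (by omega : ¬ a.1 = 0),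
          if_neg (by omega : ¬ a.1 = 0)]
        simp [List.find?_cons, hx]

-- Python's min on a 0/1-ranked list is the first rank-0 element if any, else the first element
lemma min?_zero_one {P : Type} (m : List (Nat × P))
    (hm : ∀ x ∈ m, x.1 = 0 ∨ x.1 = 1) :
    PySem.List.min? m (fun x => x.1) =
      match m.find? (fun x => x.1 == 0) with
      | some x => some x
      | none => m.head? := by
  cases m with
  | nil => simp [PySem.List.min?]
  | cons b t =>
    have hmt : ∀ x ∈ t, x.1 = 0 ∨ x.1 = 1 := fun x hx => hm x (by simp [hx])
    have hb : b.1 = 0 ∨ b.1 = 1 := hm b (by simp)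
    have hfold : PySem.List.min? (b :: t) (fun x => x.1) =
        List.foldl
          (fun acc x =>
            match acc with
            | none => some x
            | some mm => if x.1 < mm.1 then some x else some mm)
          (some b) t := by
      unfold PySem.List.min?
      simp only [List.foldl_cons]
      congr 1
      funext acc x
      cases acc <;> rfl
    rw [hfold, min?_fold_zero_one t hmt b hb]
    simp only [List.find?_cons, List.head?]
    rcases hb with hb | hb
    · simp [hb]
    · rw [if_neg (by omega : ¬ b.1 = 0), show (b.1 == 0) = false by simp [hb]]
      cases hf : t.find? (fun x => x.1 == 0) <;> simp [hf]

-- ===== VERDICT (by name: the statement is the Claim_ definition above) =====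
theorem search_prep_spec : Claim_equal_search_prep := by
  intro prep_info key _
  unfold Spec_search_prep search_prep search_prep_alt
  rw [searchALoop_eq_pvM]
  show pvOut (pvM key prep_info) [] =
    (match PySem.List.min? (pvM key prep_info) (fun m => m.1) with
     | some m => some m.2
     | none => none)
  rw [min?_zero_one (pvM key prep_info) (pvM_rank_mem key prep_info)]
  unfold pvOut
  cases hf : (pvM key prep_info).find? (fun x => x.1 == 0) <;>
    cases hh : (pvM key prep_info).head? <;> simp [hf, hh]
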